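-- pv_equiv track=rewrite | github.com/EwanClarke/decision_tree_classification | src/datasetSplitting.py | calculate_sublist_sizes
-- ===== SOURCE A (Python) =====
-- def calculate_sublist_sizes(no_of_sublists, no_of_items):
--     sublist_size = no_of_items // no_of_sublists
--     sublist_sizes = [sublist_size] * no_of_sublists
--     bin_size_remainder = no_of_items % no_of_sublists
--     for i in range(bin_size_remainder):  # remainder size added to the outer sublists
--         index_to_increment = i // 2
--         if i % 2 == 1:
--             index_to_increment = (index_to_increment + 1) * -1
--         sublist_sizes[index_to_increment] += 1
--     return sublist_sizes
-- ===== SOURCE B (Python) =====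
-- def calculate_sublist_sizes(no_of_sublists, no_of_items):
--     sublist_size = no_of_items // no_of_sublists
--     remainder = no_of_items % no_of_sublists
--     front = (remainder + 1) // 2
--     back = remainder // 2
--     return [sublist_size + 1 if idx < front or idx >= no_of_sublists - back
--             else sublist_size
--             for idx in range(no_of_sublists)]
-- ===== Notes on version B (the rewrite author's own statement) =====
-- stated objective: simpler
-- what changed: B computes each sublist's final size directly in one pass via closed-form front/back remainder counts ((r+1)//2 and r//2), instead of A's uniform list mutated through an alternating positive/negative index trick.
import Mathlib
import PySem

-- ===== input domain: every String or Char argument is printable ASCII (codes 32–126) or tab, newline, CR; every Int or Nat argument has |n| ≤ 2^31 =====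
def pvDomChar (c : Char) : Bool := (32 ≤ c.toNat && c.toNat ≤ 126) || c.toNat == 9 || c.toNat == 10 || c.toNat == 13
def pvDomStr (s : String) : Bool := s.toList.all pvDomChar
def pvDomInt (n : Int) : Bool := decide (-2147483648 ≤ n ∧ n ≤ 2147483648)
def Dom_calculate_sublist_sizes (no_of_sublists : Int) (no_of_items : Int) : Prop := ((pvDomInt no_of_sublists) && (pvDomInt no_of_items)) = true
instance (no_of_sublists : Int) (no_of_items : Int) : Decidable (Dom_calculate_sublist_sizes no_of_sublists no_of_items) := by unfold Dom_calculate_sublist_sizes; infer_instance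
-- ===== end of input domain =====

-- B computes each final sublist size directly (closed-form front/back counts, one pass)
-- instead of A's uniform list mutated by the alternating ± index trick; objective: simpler.

-- ===== PORT A =====
-- Python `xs[i] += 1` with Python's negative-index rule; every index the loop
-- produces is in range (remainder < no_of_sublists), where this is exact.
def pyIncAt (xs : List Int) (i : Int) : List Int :=
  let j := if i < 0 then i + xs.length else i
  xs.modify j.toNat (· + 1)

def calculate_sublist_sizes (no_of_sublists : Int) (no_of_items : Int) : List Int :=
  let sublist_size := PySem.Int.floordiv no_of_items no_of_sublists
  let sublist_sizes := List.replicate no_of_sublists.toNat sublist_size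
  let bin_size_remainder := PySem.Int.mod no_of_items no_of_sublists
  (PySem.List.pyRange 0 bin_size_remainder 1).foldl
    (fun acc i =>
      let index_to_increment := PySem.Int.floordiv i 2
      let index_to_increment :=
        if PySem.Int.mod i 2 = 1 then -(index_to_increment + 1) else index_to_increment
      pyIncAt acc index_to_increment)
    sublist_sizes

-- ===== PORT B =====
def calculate_sublist_sizes_alt (no_of_sublists : Int) (no_of_items : Int) : List Int :=
  let sublist_size := PySem.Int.floordiv no_of_items no_of_sublists
  let remainder := PySem.Int.mod no_of_items no_of_sublists
  let front := PySem.Int.floordiv (remainder + 1) 2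
  let back := PySem.Int.floordiv remainder 2
  (PySem.List.pyRange 0 no_of_sublists 1).map
    (fun idx =>
      if idx < front ∨ no_of_sublists - back ≤ idx then sublist_size + 1 else sublist_size)

-- ===== PRECONDITION & SPEC =====
-- Python A raises ZeroDivisionError iff no_of_sublists = 0; it returns on all other inputs.
def Pre_calculate_sublist_sizes (no_of_sublists : Int) (no_of_items : Int) : Prop :=
  no_of_sublists ≠ 0
instance (no_of_sublists : Int) (no_of_items : Int) : Decidable (Pre_calculate_sublist_sizes no_of_sublists no_of_items) := by unfold Pre_calculate_sublist_sizes; infer_instance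
def pvWitness_calculate_sublist_sizes : Int × Int := (3, 7)

def Spec_calculate_sublist_sizes (no_of_sublists : Int) (no_of_items : Int) (out : List Int) : Prop := out = calculate_sublist_sizes_alt no_of_sublists no_of_items
instance (no_of_sublists : Int) (no_of_items : Int) (out : List Int) : Decidable (Spec_calculate_sublist_sizes no_of_sublists no_of_items out) := by unfold Spec_calculate_sublist_sizes; infer_instance

-- ===== CLAIM (what is proved, stated in full; the proofs are below) =====
def Claim_equal_calculate_sublist_sizes : Prop := ∀ (no_of_sublists : Int) (no_of_items : Int), Dom_calculate_sublist_sizes no_of_sublists no_of_items → Pre_calculate_sublist_sizes no_of_sublists no_of_items → Spec_calculate_sublist_sizes no_of_sublists no_of_items (calculate_sublist_sizes no_of_sublists no_of_items)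

-- ===== LEMMAS AND PROOFS =====

lemma pyRange_one_nonpos {r : Int} (h : r ≤ 0) : PySem.List.pyRange 0 r 1 = [] := by
  simp only [PySem.List.pyRange, one_ne_zero, ↓reduceIte, one_mul, zero_add, zero_lt_one,
    sub_zero, add_sub_cancel_right, EuclideanDomain.div_one, List.map_eq_nil_iff,
    List.range_eq_nil, ite_eq_right_iff, Int.toNat_eq_zero]
  omega

-- A's loop, after R iterations on a uniform list of length N, in direct-indexed form.
lemma loopA_eq (N : Nat) (B : Int) :
    ∀ (R : Nat), R ≤ N →
    (PySem.List.pyRange 0 (R : Int) 1).foldl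
      (fun acc i =>
        let index_to_increment := PySem.Int.floordiv i 2
        let index_to_increment :=
          if PySem.Int.mod i 2 = 1 then -(index_to_increment + 1) else index_to_increment
        pyIncAt acc index_to_increment)
      (List.replicate N B)
    = (List.range N).map
        (fun idx => if idx < (R + 1) / 2 ∨ N - R / 2 ≤ idx then B + 1 else B) := by
  intro R
  induction R with
  | zero =>
    intro _
    rw [Nat.cast_zero, pyRange_one_nonpos le_rfl]
    simp only [List.foldl_nil]
    apply List.ext_getElem
    · simp
    · intro i h1 h2
      simp only [List.getElem_replicate, List.getElem_map, List.getElem_range]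
      rw [if_neg (by simp at h2; omega)]
  | succ R ih =>
    intro hRN
    have hR : R ≤ N := Nat.le_of_succ_le hRN
    rw [Nat.cast_succ, PySem.List.pyRange_one_succ_right (by positivity),
      List.foldl_append, ih hR]
    simp only [List.foldl_cons, List.foldl_nil]
    have hmod : PySem.Int.mod (R : Int) 2 = ((R % 2 : Nat) : Int) := by
      exact_mod_cast PySem.Int.mod_natCast R 2
    have hdiv : PySem.Int.floordiv (R : Int) 2 = ((R / 2 : Nat) : Int) := by
      exact_mod_cast PySem.Int.floordiv_natCast R 2
    rcases Nat.even_or_odd R with he | ho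
    · -- even iteration: increments position R / 2
      have h2 : R % 2 = 0 := Nat.even_iff.mp he
      rw [hmod, hdiv, if_neg (by simp [h2]), pyIncAt]
      simp only [List.length_map, List.length_range]
      rw [if_neg (by omega)]
      apply List.ext_getElem
      · simp [List.length_modify]
      · intro i h1 h2'
        rw [List.getElem_modify]
        simp only [List.getElem_map, List.getElem_range]
        simp only [List.length_map, List.length_range] at h2'
        have hi : i < N := by simpa using h2'
        have htn : ((R / 2 : Nat) : Int).toNat = R / 2 := by omega
        rw [htn]
        split_ifs <;> omega
    · -- odd iteration: increments position N - R / 2 - 1 (Python index -(R/2+1))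
      have h2 : R % 2 = 1 := Nat.odd_iff.mp ho
      rw [hmod, hdiv, if_pos (by rw [h2]; norm_num), pyIncAt]
      simp only [List.length_map, List.length_range]
      have hneg : -(((R / 2 : Nat) : Int) + 1) < 0 := by omega
      rw [if_pos hneg]
      have htn : (-(((R / 2 : Nat) : Int) + 1) + (N : Int)).toNat = N - R / 2 - 1 := by omega
      rw [htn]
      apply List.ext_getElem
      · simp [List.length_modify]
      · intro i h1 h2'
        rw [List.getElem_modify]
        simp only [List.getElem_map, List.getElem_range]
        simp only [List.length_map, List.length_range] at h2'
        have hi : i < N := by simpa using h2'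
        split_ifs <;> omega

-- ===== VERDICT (by name: the statement is the Claim_ definition above) =====
theorem calculate_sublist_sizes_spec : Claim_equal_calculate_sublist_sizes := by
  intro n m _ hPre
  unfold Spec_calculate_sublist_sizes calculate_sublist_sizes calculate_sublist_sizes_alt
  dsimp only
  rcases lt_trichotomy n 0 with hn | hn | hn
  · -- n < 0: both sides are the empty list
    have hr : PySem.Int.mod m n ≤ 0 := (PySem.Int.mod_neg_bounds m hn).2
    rw [pyRange_one_nonpos hr, pyRange_one_nonpos (le_of_lt hn)]
    simp [Int.toNat_of_nonpos (le_of_lt hn)]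
  · exact absurd hn hPre
  · -- n > 0
    obtain ⟨N, rfl⟩ : ∃ N : Nat, n = (N : Int) := ⟨n.toNat, by omega⟩
    have hN : 0 < N := by exact_mod_cast hn
    have hr0 : 0 ≤ PySem.Int.mod m (N : Int) := PySem.Int.mod_nonneg m hn
    have hrlt : PySem.Int.mod m (N : Int) < (N : Int) := PySem.Int.mod_lt m hn
    obtain ⟨R, hR⟩ : ∃ R : Nat, PySem.Int.mod m (N : Int) = (R : Int) :=
      ⟨(PySem.Int.mod m (N : Int)).toNat, by omega⟩
    have hRN : R ≤ N := by omega
    rw [hR, Int.toNat_natCast, loopA_eq N _ R hRN, PySem.List.pyRange_zero_natCast,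
      List.map_map]
    have hfront : PySem.Int.floordiv ((R : Int) + 1) 2 = (((R + 1) / 2 : Nat) : Int) := by
      have := PySem.Int.floordiv_natCast (R + 1) 2
      push_cast at this ⊢
      exact_mod_cast this
    have hback : PySem.Int.floordiv (R : Int) 2 = ((R / 2 : Nat) : Int) := by
      exact_mod_cast PySem.Int.floordiv_natCast R 2
    rw [hfront, hback]
    apply List.map_congr_left
    intro i hi
    simp only [List.mem_range] at hi
    simp only [Function.comp]
    apply if_congr _ rfl rfl
    constructor <;> intro h <;> [skip; skip] <;> omega
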